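-- pv_equiv track=rewrite | github.com/jaylikesminecraft/flashcard-generator | hallucinatecheck.py | remove_empty_antonyms_section
-- ===== SOURCE A (Python) =====
-- def remove_empty_antonyms_section(raw_content: str) -> str:
--     """
--     Finds the '### Antonyms' section. If its content contains 'none' (case-insensitive),
--     removes the entire section (header and content).
--     """
--     lines = raw_content.splitlines()
--
--     # Find the start and end of the Antonyms section, if it's "empty"
--     antonyms_start_index = -1
--     antonyms_end_index = -1
--
--     for i, line in enumerate(lines):
--         if line.strip() == "### Antonyms":
--             # Check the next line to see if it's a "none" line
--             if i + 1 < len(lines) and "none" in lines[i + 1].lower():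
--                 antonyms_start_index = i
--                 # Now find where this section ends
--                 for j in range(i + 1, len(lines)):
--                     if lines[j].strip().startswith("### "):
--                         antonyms_end_index = j
--                         break
--                 # If no other header is found, it goes to the end of the file
--                 if antonyms_end_index == -1:
--                     antonyms_end_index = len(lines)
--                 break  # Found what we're looking for, exit the outer loop
--
--     # If we found a section to remove, build the new content
--     if antonyms_start_index != -1:
--         # Slicing creates the new list of lines without the target section
--         new_lines = lines[:antonyms_start_index] + lines[antonyms_end_index:]
--         # Join, remove trailing whitespace that might result, and add a final newline
--         return "\n".join(new_lines).rstrip() + "\n"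
--
--     # Otherwise, return the original content unchanged
--     return raw_content
-- ===== SOURCE B (Python) =====
-- def remove_empty_antonyms_section(raw_content: str) -> str:
--     """Split the lines into header-led section groups (plus a preamble group),
--     drop the first Antonyms group whose content line says 'none', and rejoin."""
--     lines = raw_content.splitlines()
--
--     def split_groups(ls):
--         # Each group is one leading line plus the following non-header lines.
--         if not ls:
--             return []
--         k = 1
--         while k < len(ls) and not ls[k].strip().startswith("### "):
--             k += 1
--         return [ls[:k]] + split_groups(ls[k:])
--
--     def scan(groups):
--         # Returns the remaining lines if a qualifying group was removed, else None.
--         if not groups: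
--             return None
--         g, rest = groups[0], groups[1:]
--         if g[0].strip() == "### Antonyms" and len(g) > 1 and "none" in g[1].lower():
--             return [ln for grp in rest for ln in grp]
--         r = scan(rest)
--         return None if r is None else g + r
--
--     remaining = scan(split_groups(lines))
--     if remaining is None:
--         return raw_content
--     return "\n".join(remaining).rstrip() + "\n"
-- ===== Notes on version B (the rewrite author's own statement) =====
-- stated objective: simpler
-- what changed: B replaces A's index bookkeeping (nested loops over enumerate/range with -1 sentinels and list slicing) by a structural decomposition: split the lines into header-led section groups, drop the first Antonyms group whose own content line says 'none', and concatenate the survivors; Pre_ excludes inputs where a '### Antonyms' line is directly followed by another '### ' header whose title mentions 'none', a contentless-section corner where removing the bare header (A) and leaving it for lack of a content line (B) are both defensible.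
-- outside the precondition, e.g. on remove_empty_antonyms_section('### Antonyms\n### none'): A returns '### none\n', B returns '### Antonyms\n### none'
import Mathlib
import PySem

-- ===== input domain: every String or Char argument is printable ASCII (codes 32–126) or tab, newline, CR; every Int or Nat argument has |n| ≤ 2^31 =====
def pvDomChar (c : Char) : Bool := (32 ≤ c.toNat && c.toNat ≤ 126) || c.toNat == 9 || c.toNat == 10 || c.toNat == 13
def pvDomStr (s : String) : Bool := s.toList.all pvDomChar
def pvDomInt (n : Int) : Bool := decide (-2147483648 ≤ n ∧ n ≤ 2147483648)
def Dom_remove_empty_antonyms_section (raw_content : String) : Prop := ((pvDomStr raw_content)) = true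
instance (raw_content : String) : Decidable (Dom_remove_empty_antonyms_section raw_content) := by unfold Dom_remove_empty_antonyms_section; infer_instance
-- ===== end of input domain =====

-- B re-groups the lines into header-led sections and drops the first Antonyms group whose
-- own content line says 'none' (objective: simpler decomposition, same cost); Pre_ below excludes
-- a contentless-section corner. Both programs build a fresh string, no mutation.

-- shared one-line wrappers over the Python string primitives
def pvIsHeader (l : String) : Bool := PySem.Str.startswith (PySem.Str.strip l) "### "
def pvIsAnton (l : String) : Bool := PySem.Str.strip l == "### Antonyms"
def pvHasNone (l : String) : Bool := PySem.Str.isIn "none" (PySem.Str.lower l)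

-- ===== PORT A =====
-- `line.strip() == "### Antonyms" and i + 1 < len(lines) and "none" in lines[i+1].lower()`,
-- where ls = lines[i+1:] (so `i + 1 < len(lines)` is `ls ≠ []` and lines[i+1] is ls.head)
def pvCondA (l : String) (ls : List String) : Bool :=
  pvIsAnton l && (match ls with | [] => false | x :: _ => pvHasNone x)

-- inner loop `for j in range(i+1, len(lines)): if lines[j].strip().startswith("### "): end = j; break`,
-- iterated as the suffix lines[i+1:] carried with its absolute index j (none = loop fell through, end stays -1)
def pvFindEndA : List String → Nat → Option Nat
  | [], _ => none
  | l :: ls, j => if pvIsHeader l then some j else pvFindEndA ls (j + 1)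

-- outer loop `for i, line in enumerate(lines)`: the suffix lines[i:] with its index i; n = len(lines);
-- returns (antonyms_start_index, antonyms_end_index) once both are set and the loop breaks
def pvFindStartA : List String → Nat → Nat → Option (Nat × Nat)
  | [], _, _ => none
  | l :: ls, i, n =>
    if pvCondA l ls then
      -- `if antonyms_end_index == -1: antonyms_end_index = len(lines)`
      some (i, (pvFindEndA ls (i + 1)).getD n)
    else
      pvFindStartA ls (i + 1) n

def remove_empty_antonyms_section (raw_content : String) : String :=
  let lines := PySem.Str.splitlines raw_content
  match pvFindStartA lines 0 lines.length with
  | some (s, e) =>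
      -- lines[:s] + lines[e:] with 0 ≤ s ≤ e ≤ len(lines): exactly List.take / List.drop
      PySem.Str.rstrip (PySem.Str.join "\n" (lines.take s ++ lines.drop e)) ++ "\n"
  | none => raw_content

-- ===== PORT B =====
-- split_groups: one leading line plus the following non-header lines, recursively
def pvSplitGroups : List String → List (List String)
  | [] => []
  | l :: ls =>
      (l :: ls.takeWhile (fun x => !pvIsHeader x)) ::
        pvSplitGroups (ls.dropWhile (fun x => !pvIsHeader x))
termination_by ls => ls.length
decreasing_by
  simpa using Nat.lt_succ_of_le (List.length_dropWhile_le _ _)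

-- `g[0].strip() == "### Antonyms" and len(g) > 1 and "none" in g[1].lower()`
-- (groups are nonempty by construction, so g.headD "" is Python's g[0])
def pvCondB (g : List String) : Bool :=
  pvIsAnton (g.headD "") &&
    (match g with | _ :: x :: _ => pvHasNone x | _ => false)

-- scan: remaining lines if a qualifying group was removed, else none
def pvScanGroups : List (List String) → Option (List String)
  | [] => none
  | g :: gs =>
      if pvCondB g then some gs.flatten
      else (pvScanGroups gs).map (fun r => g ++ r)

def remove_empty_antonyms_section_alt (raw_content : String) : String :=
  let lines := PySem.Str.splitlines raw_content
  match pvScanGroups (pvSplitGroups lines) with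
  | some remaining => PySem.Str.rstrip (PySem.Str.join "\n" remaining) ++ "\n"
  | none => raw_content

-- ===== PRECONDITION & SPEC =====
-- Pre_ excludes inputs where a '### Antonyms' line is directly followed by another '### ' section
-- header whose title mentions 'none' — a contentless-section corner no caller would specify, where
-- removing the bare header (A) and leaving it for lack of a content line (B) are both defensible.
def Pre_remove_empty_antonyms_section (raw_content : String) : Prop :=
  ∀ p ∈ (PySem.Str.splitlines raw_content).zip (PySem.Str.splitlines raw_content).tail,
    ¬ (PySem.Str.strip p.1 = "### Antonyms" ∧
       PySem.Str.isIn "none" (PySem.Str.lower p.2) = true ∧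
       PySem.Str.startswith (PySem.Str.strip p.2) "### " = true)
instance (raw_content : String) : Decidable (Pre_remove_empty_antonyms_section raw_content) := by
  unfold Pre_remove_empty_antonyms_section; infer_instance

def pvWitness_remove_empty_antonyms_section : String := "### Antonyms\nnone\n### Synonyms\nbig"

def Spec_remove_empty_antonyms_section (raw_content : String) (out : String) : Prop := out = remove_empty_antonyms_section_alt raw_content
instance (raw_content : String) (out : String) : Decidable (Spec_remove_empty_antonyms_section raw_content out) := by unfold Spec_remove_empty_antonyms_section; infer_instance

-- ===== CLAIM (what is proved, stated in full; the proofs are below) =====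
def Claim_equal_remove_empty_antonyms_section : Prop := ∀ (raw_content : String), Dom_remove_empty_antonyms_section raw_content → Pre_remove_empty_antonyms_section raw_content → Spec_remove_empty_antonyms_section raw_content (remove_empty_antonyms_section raw_content)

-- ===== LEMMAS AND PROOFS =====

-- proof-side helpers: the first-trigger scan underlying both programs' disagreement
def pvDTrig (l x : String) : Bool :=
  (PySem.Str.strip l == "### Antonyms") && PySem.Str.isIn "none" (PySem.Str.lower x)

def pvDScan (ls : List String) : Bool :=
  match (ls.zip ls.tail).find? (fun p => pvDTrig p.1 p.2) with
  | some p => PySem.Str.startswith (PySem.Str.strip p.2) "### "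
  | none => false

lemma pvDScan_cons (l x : String) (t : List String) :
    pvDScan (l :: x :: t) =
      if pvDTrig l x then pvIsHeader x else pvDScan (x :: t) := by
  simp only [pvDScan, List.tail_cons, List.zip_cons_cons, List.find?_cons, pvIsHeader]
  by_cases h : pvDTrig l x <;> simp [h]

lemma pvDTrig_eq_condA (l x : String) (t : List String) :
    pvDTrig l x = pvCondA l (x :: t) := by
  simp [pvDTrig, pvCondA, pvIsAnton, pvHasNone]

-- if the scan fires, some adjacent pair violates Pre_
lemma pvDScan_true_imp (ls : List String) (h : pvDScan ls = true) :
    ∃ p ∈ ls.zip ls.tail,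
      PySem.Str.strip p.1 = "### Antonyms" ∧
      PySem.Str.isIn "none" (PySem.Str.lower p.2) = true ∧
      PySem.Str.startswith (PySem.Str.strip p.2) "### " = true := by
  unfold pvDScan at h
  cases hf : (ls.zip ls.tail).find? (fun p => pvDTrig p.1 p.2) with
  | none => rw [hf] at h; cases h
  | some p =>
      rw [hf] at h
      have hmem := List.mem_of_find?_eq_some hf
      have htr : pvDTrig p.1 p.2 = true := by simpa using List.find?_some hf
      have hAN : PySem.Str.strip p.1 = "### Antonyms" ∧
          PySem.Str.isIn "none" (PySem.Str.lower p.2) = true := by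
        simpa [pvDTrig] using htr
      exact ⟨p, hmem, hAN.1, hAN.2, h⟩

lemma pvIsHeader_of_anton {l : String} (h : pvIsAnton l = true) : pvIsHeader l = true := by
  unfold pvIsAnton at h
  unfold pvIsHeader
  rw [show PySem.Str.strip l = "### Antonyms" from by simpa using h]
  decide

lemma pvCondA_of_not_header {l : String} (ls : List String) (h : pvIsHeader l = false) :
    pvCondA l ls = false := by
  have : pvIsAnton l = false := by
    by_contra hc
    exact absurd (pvIsHeader_of_anton (by simpa using Bool.of_not_eq_false hc)) (by simp [h])
  simp [pvCondA, this]

lemma pvDScan_append {body : List String} (rest : List String)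
    (hb : ∀ x ∈ body, pvIsHeader x = false) :
    pvDScan (body ++ rest) = pvDScan rest := by
  induction body with
  | nil => simp
  | cons b bs ih =>
      have hbh := hb b (by simp)
      have ih' := ih (fun x hx => hb x (List.mem_cons_of_mem _ hx))
      rw [List.cons_append]
      cases hbt : bs ++ rest with
      | nil =>
          have hrnil : rest = [] := (List.append_eq_nil_iff.mp hbt).2
          subst hrnil
          simp [pvDScan]
      | cons y t =>
          rw [pvDScan_cons, ← hbt, ih']
          have : pvDTrig b y = false := by
            have := pvCondA_of_not_header (l := b) (y :: t) hbh
            rw [← pvDTrig_eq_condA (t := t)] at this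
            exact this
          simp [this]

lemma pvFindEndA_append {body : List String} (rest : List String) (j : Nat)
    (hb : ∀ x ∈ body, pvIsHeader x = false) :
    pvFindEndA (body ++ rest) j = pvFindEndA rest (j + body.length) := by
  induction body generalizing j with
  | nil => simp
  | cons b bs ih =>
      have hbh := hb b (by simp)
      simp only [List.cons_append, pvFindEndA, hbh, Bool.false_eq_true, if_false]
      rw [ih _ (fun x hx => hb x (List.mem_cons_of_mem _ hx))]
      congr 1
      simp
      omega

lemma pvFindStartA_append {body : List String} (rest : List String) (i n : Nat)
    (hb : ∀ x ∈ body, pvIsHeader x = false) :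
    pvFindStartA (body ++ rest) i n = pvFindStartA rest (i + body.length) n := by
  induction body generalizing i with
  | nil => simp
  | cons b bs ih =>
      have hbh := hb b (by simp)
      simp only [List.cons_append, pvFindStartA,
        pvCondA_of_not_header (bs ++ rest) hbh, Bool.false_eq_true, if_false]
      rw [ih _ (fun x hx => hb x (List.mem_cons_of_mem _ hx))]
      congr 1
      simp
      omega

lemma pvSplitGroups_flatten (ls : List String) : (pvSplitGroups ls).flatten = ls := by
  induction ls using pvSplitGroups.induct with
  | case1 => simp [pvSplitGroups]
  | case2 l ls ih =>
      rw [pvSplitGroups]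
      simp only [List.flatten_cons, ih]
      simp [List.takeWhile_append_dropWhile]

lemma pvMain (ls : List String) (i : Nat) (hD : pvDScan ls = false) :
    (pvScanGroups (pvSplitGroups ls) = none → pvFindStartA ls i (i + ls.length) = none) ∧
    (∀ rem, pvScanGroups (pvSplitGroups ls) = some rem →
      ∃ s e, pvFindStartA ls i (i + ls.length) = some (i + s, i + e) ∧
        rem = ls.take s ++ ls.drop e) := by
  induction ls using pvSplitGroups.induct generalizing i with
  | case1 => simp [pvSplitGroups, pvScanGroups, pvFindStartA]
  | case2 l ls ih =>
    set body := ls.takeWhile (fun x => !pvIsHeader x) with hbdef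
    set rest := ls.dropWhile (fun x => !pvIsHeader x) with hrdef
    have hsplit : body ++ rest = ls := List.takeWhile_append_dropWhile
    have hb : ∀ x ∈ body, pvIsHeader x = false := by
      intro x hx
      have h3 := List.mem_takeWhile_imp (hbdef ▸ hx)
      cases hpv : pvIsHeader x with
      | false => rfl
      | true => simp [hpv] at h3
    have hrest : rest = [] ∨ ∃ r rs, rest = r :: rs ∧ pvIsHeader r = true := by
      cases hre : rest with
      | nil => exact Or.inl rfl
      | cons r rs =>
        refine Or.inr ⟨r, rs, rfl, ?_⟩
        have hre' : ls.dropWhile (fun x => !pvIsHeader x) = r :: rs := hrdef ▸ hre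
        have hl0 : 0 < (ls.dropWhile (fun x => !pvIsHeader x)).length := by
          rw [hre']; simp
        have h2 := List.dropWhile_get_zero_not (p := fun x => !pvIsHeader x) ls hl0
        simp [hre'] at h2
        exact h2
    have hn : i + (l :: ls).length = (i + 1 + body.length) + rest.length := by
      have := congrArg List.length hsplit
      simp only [List.length_append] at this
      simp [← this]; omega
    by_cases hc : pvCondA l ls = true
    · -- the first qualifying section starts right here, and by ¬D_ it has a content line
      obtain ⟨x, t, hls⟩ : ∃ x t, ls = x :: t := by
        rcases ls with _ | ⟨x, t⟩
        · simp [pvCondA] at hc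
        · exact ⟨x, t, rfl⟩
      have htrig : pvDTrig l x = true := by rw [pvDTrig_eq_condA (t := t), ← hls]; exact hc
      have hxh : pvIsHeader x = false := by
        rw [hls, pvDScan_cons, htrig] at hD
        simpa using hD
      have hbody : body = x :: t.takeWhile (fun y => !pvIsHeader y) := by
        rw [hbdef, hls, List.takeWhile_cons, if_pos (by simp [hxh])]
      have hcondB : pvCondB (l :: body) = true := by
        have hAN : pvIsAnton l = true ∧ pvHasNone x = true := by
          have h0 := hc
          rw [hls] at h0
          simpa [pvCondA] using h0
        simp [pvCondB, hbody, hAN.1, hAN.2]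
      have hscan : pvScanGroups (pvSplitGroups (l :: ls)) = some rest := by
        rw [pvSplitGroups]
        rw [pvScanGroups]
        rw [if_pos hcondB]
        simp [pvSplitGroups_flatten, ← hrdef]
      have hend : (pvFindEndA ls (i + 1)).getD (i + (l :: ls).length) = i + (1 + body.length) := by
        rw [← hsplit, pvFindEndA_append rest (i + 1) hb]
        rcases hrest with hre | ⟨r, rs, hre, hhr⟩
        · rw [hre]
          simp only [pvFindEndA, Option.getD_none]
          rw [hre] at hsplit
          have := congrArg List.length hsplit
          simp at this ⊢
          omega
        · rw [hre]
          simp only [pvFindEndA, hhr, if_true, Option.getD_some]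
          omega
      have hA : pvFindStartA (l :: ls) i (i + (l :: ls).length) =
          some (i, i + (1 + body.length)) := by
        rw [pvFindStartA, if_pos hc, hend]
      constructor
      · intro h; rw [hscan] at h; cases h
      · intro rem h
        rw [hscan] at h
        refine ⟨0, 1 + body.length, by simpa using hA, ?_⟩
        have hdrop : (l :: ls).drop (1 + body.length) = rest := by
          rw [Nat.add_comm, List.drop_succ_cons, ← hsplit, List.drop_left]
        simp [hdrop, ← Option.some.injEq, ← h]
    · -- no removal in this group: skip it and recurse
      have hc' : pvCondA l ls = false := eq_false_of_ne_true hc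
      have hcondB : pvCondB (l :: body) = false := by
        rcases hbody : body with _ | ⟨b0, bt⟩
        · simp [pvCondB]
        · have hls0 : ∃ t, ls = b0 :: t := by
            have : body ++ rest = ls := hsplit
            rw [hbody] at this
            exact ⟨bt ++ rest, this.symm⟩
          obtain ⟨t, hls⟩ := hls0
          unfold pvCondB
          simp only [List.headD_cons]
          have := hc'
          unfold pvCondA at this
          rw [hls] at this
          rcases Bool.and_eq_false_iff.mp this with h | h
          · simp [h]
          · simp [h]
      have hDls : pvDScan ls = false := by
        rcases ls with _ | ⟨x, t⟩
        · simp [pvDScan]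
        · have htrig : pvDTrig l x = false := by
            rw [pvDTrig_eq_condA (t := t)]; exact hc'
          rw [pvDScan_cons, htrig] at hD
          simpa using hD
      have hDrest : pvDScan rest = false := by
        rw [← hsplit, pvDScan_append rest hb] at hDls
        exact hDls
      have hscan : pvScanGroups (pvSplitGroups (l :: ls)) =
          (pvScanGroups (pvSplitGroups rest)).map (fun r => (l :: body) ++ r) := by
        rw [pvSplitGroups]
        rw [pvScanGroups]
        rw [if_neg (by simp [← hbdef, hcondB])]
      have hAstep : ∀ n, pvFindStartA (l :: ls) i n =
          pvFindStartA rest (i + 1 + body.length) n := by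
        intro n
        rw [pvFindStartA, if_neg (by simp [hc'])]
        rw [← hsplit, pvFindStartA_append rest (i + 1) n hb]
      obtain ⟨ihn, ihs⟩ := ih (i + 1 + body.length) hDrest
      constructor
      · intro h
        rw [hscan, Option.map_eq_none_iff] at h
        rw [hn, hAstep]
        exact ihn h
      · intro rem h
        rw [hscan, Option.map_eq_some_iff] at h
        obtain ⟨rem', h', hrem⟩ := h
        obtain ⟨s', e', hfind, hrem'⟩ := ihs rem' h'
        refine ⟨1 + body.length + s', 1 + body.length + e', ?_, ?_⟩
        · rw [hn, hAstep, hfind]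
          simp only [Option.some.injEq, Prod.mk.injEq]
          omega
        · have htake : (l :: ls).take (1 + body.length + s') = l :: (body ++ rest.take s') := by
            rw [show 1 + body.length + s' = (body.length + s') + 1 by omega,
              List.take_succ_cons, ← hsplit, List.take_length_add_append]
          have hdrop : (l :: ls).drop (1 + body.length + e') = rest.drop e' := by
            rw [show 1 + body.length + e' = (body.length + e') + 1 by omega,
              List.drop_succ_cons, ← hsplit, List.drop_length_add_append]
          rw [htake, hdrop, ← hrem, hrem']
          simp

-- ===== VERDICT (by name: the statement is the Claim_ definition above) =====
theorem remove_empty_antonyms_section_spec : Claim_equal_remove_empty_antonyms_section := by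
  intro raw _ hpre
  unfold Spec_remove_empty_antonyms_section
  have hD : pvDScan (PySem.Str.splitlines raw) = false := by
    cases h : pvDScan (PySem.Str.splitlines raw)
    · rfl
    · obtain ⟨p, hmem, h1, h2, h3⟩ := pvDScan_true_imp _ h
      exact absurd ⟨h1, h2, h3⟩ (hpre p hmem)
  unfold remove_empty_antonyms_section remove_empty_antonyms_section_alt
  have h := pvMain (PySem.Str.splitlines raw) 0 hD
  cases hscan : pvScanGroups (pvSplitGroups (PySem.Str.splitlines raw)) with
  | none =>
      have := h.1 hscan
      simp only [Nat.zero_add] at this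
      simp [this, hscan]
  | some rem =>
      obtain ⟨s, e, hfind, hrem⟩ := h.2 rem hscan
      simp only [Nat.zero_add] at hfind
      simp [hfind, hscan, hrem]
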